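-- pv_equiv track=rewrite | github.com/printhaider/Real-Estate-Listing-Optimization | most_recent_listings.py | most_recent_listings
-- ===== SOURCE A (Python) =====
-- def most_recent_listings(listings):
--     # sort the listings by address and date in descending order
--     sorted_listings = sorted(listings, key=lambda x: (x[1], -int(x[2])))
--
--     most_recent = []
--     current_address = None
--
--     # iterate through the sorted listings and add the most recent listing for each address to the most_recent list
--     for listing in sorted_listings:
--         address = listing[1]
--         if address != current_address:
--             most_recent.append(listing[0])
--             current_address = address
--
--     return most_recent
-- ===== SOURCE B (Python) =====
-- def most_recent_listings(listings):
--     # one pass: best listing per address (keep first seen among equal dates)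
--     best = {}
--     for listing in listings:
--         a = listing[1]
--         d = int(listing[2])
--         cur = best.get(a)
--         best[a] = (listing[0], d) if cur is None or cur[1] < d else cur
--     return [best[a][0] for a in sorted(best)]
-- ===== Notes on version B (the rewrite author's own statement) =====
-- stated objective: alternative
-- what changed: A sorts all listings by (address, -int(date)) and scans for group heads; B makes one dict-building pass keeping the best (strictly later-dated, first seen on ties) listing per address and then sorts only the distinct addresses.
import Mathlib
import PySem

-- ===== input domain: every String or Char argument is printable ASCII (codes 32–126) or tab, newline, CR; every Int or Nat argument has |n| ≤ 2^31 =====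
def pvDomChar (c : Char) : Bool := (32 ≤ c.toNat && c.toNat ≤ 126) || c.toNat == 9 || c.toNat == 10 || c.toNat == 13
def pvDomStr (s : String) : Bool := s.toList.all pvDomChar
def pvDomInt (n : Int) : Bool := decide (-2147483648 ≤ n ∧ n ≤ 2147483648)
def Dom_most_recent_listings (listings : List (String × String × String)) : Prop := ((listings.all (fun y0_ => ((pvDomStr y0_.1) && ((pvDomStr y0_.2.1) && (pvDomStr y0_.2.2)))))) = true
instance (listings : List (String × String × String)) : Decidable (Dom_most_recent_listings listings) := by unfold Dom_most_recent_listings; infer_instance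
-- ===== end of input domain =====

-- B replaces A's sort-then-scan by one dict-building pass (address -> best listing, strict-greater update) followed by a sort of the distinct addresses.


-- ===== PORT A =====
def most_recent_listings (listings : List (String × String × String)) : List String :=
  let sorted_listings := PySem.List.sorted2 listings (fun x => x.2.1) (fun x => -((PySem.Int.ofStr? x.2.2).getD 0))
  (sorted_listings.foldl
    (fun (st : List String × Option String) listing =>
      if some listing.2.1 ≠ st.2 then (st.1 ++ [listing.1], some listing.2.1) else st)
    ([], none)).1

-- ===== PORT B =====
def most_recent_listings_alt (listings : List (String × String × String)) : List String :=
  let best := listings.foldl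
    (fun (d : PySem.Dict String (String × Int)) l =>
      d.insert l.2.1
        (match d.get? l.2.1 with
         | none => (l.1, (PySem.Int.ofStr? l.2.2).getD 0)
         | some cur => if cur.2 < (PySem.Int.ofStr? l.2.2).getD 0 then (l.1, (PySem.Int.ofStr? l.2.2).getD 0) else cur))
    PySem.Dict.empty
  (PySem.List.sorted best.keys (fun a => a)).map (fun a => (best.getD a ("", 0)).1)

-- ===== PRECONDITION & SPEC =====
-- Pre_ excludes exactly the inputs where Python's int(x[2]) raises ValueError (a date string that is not an int literal).
def Pre_most_recent_listings (listings : List (String × String × String)) : Prop :=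
  (listings.all (fun l => (PySem.Int.ofStr? l.2.2).isSome)) = true
instance (listings : List (String × String × String)) : Decidable (Pre_most_recent_listings listings) := by unfold Pre_most_recent_listings; infer_instance
def pvWitness_most_recent_listings : (List (String × String × String)) :=
  [("id1", "5 Elm St", "20230104"), ("id2", "5 Elm St", "20230107"), ("id3", "1 Oak Av", "20230101")]

def Spec_most_recent_listings (listings : List (String × String × String)) (out : List String) : Prop := out = most_recent_listings_alt listings
instance (listings : List (String × String × String)) (out : List String) : Decidable (Spec_most_recent_listings listings out) := by unfold Spec_most_recent_listings; infer_instance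

-- ===== CLAIM (what is proved, stated in full; the proofs are below) =====
def Claim_equal_most_recent_listings : Prop := ∀ (listings : List (String × String × String)), Dom_most_recent_listings listings → Pre_most_recent_listings listings → Spec_most_recent_listings listings (most_recent_listings listings)

-- ===== LEMMAS AND PROOFS =====

-- the parsed date of a listing (0 is never used: Pre_ is not needed, both ports use getD 0)
def pvDt (x : String × String × String) : Int := (PySem.Int.ofStr? x.2.2).getD 0

-- B's per-address combining step
def pvComb (o : Option (String × Int)) (x : String × String × String) : String × Int :=
  match o with
  | none => (x.1, pvDt x)
  | some cur => if cur.2 < pvDt x then (x.1, pvDt x) else cur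

theorem pv_sorted_snoc {α κ : Type} [LT κ] [DecidableLT κ] (g : List α) (x : α) (key : α → κ) :
    PySem.List.sorted (g ++ [x]) key
    = PySem.List.insertBy (fun a b => decide (key a < key b)) x (PySem.List.sorted g key) := by
  rw [PySem.List.sorted_eq_foldl_insertBy, PySem.List.sorted_eq_foldl_insertBy, List.foldl_append]
  rfl

-- A's scan over the sorted list, recursively
def pvGo (c : Option String) : List (String × String × String) → List String
  | [] => []
  | y :: ys => if some y.2.1 ≠ c then y.1 :: pvGo (some y.2.1) ys else pvGo c ys

theorem pv_insertBy_congr {α : Type} (b1 b2 : α → α → Bool) (x : α) (ys : List α)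
    (h : ∀ y ∈ ys, b1 x y = b2 x y) :
    PySem.List.insertBy b1 x ys = PySem.List.insertBy b2 x ys := by
  induction ys with
  | nil => rfl
  | cons y t ih =>
    simp only [PySem.List.insertBy, h y (by simp)]
    split <;> simp_all

theorem pv_insertBy_append_left {α : Type} (before : α → α → Bool) (x : α) (b r : List α)
    (h : ∀ y ∈ b, before x y = false) :
    PySem.List.insertBy before x (b ++ r) = b ++ PySem.List.insertBy before x r := by
  induction b with
  | nil => rfl
  | cons y t ih => simp_all [PySem.List.insertBy]

theorem pv_insertBy_all_before {α : Type} (before : α → α → Bool) (x : α) (r : List α)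
    (h : ∀ y ∈ r, before x y = true) :
    PySem.List.insertBy before x r = x :: r := by
  cases r with
  | nil => rfl
  | cons y t => simp_all [PySem.List.insertBy]

theorem pv_insertBy_append_right {α : Type} (before : α → α → Bool) (x : α) (b r : List α)
    (h : ∀ y ∈ r, before x y = true) :
    PySem.List.insertBy before x (b ++ r) = PySem.List.insertBy before x b ++ r := by
  induction b with
  | nil => simp [PySem.List.insertBy, pv_insertBy_all_before before x r h]
  | cons y t ih =>
    simp only [List.cons_append, PySem.List.insertBy]
    split <;> simp_all

theorem pv_dict_get_fold (l : List (String × String × String))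
    (d : PySem.Dict String (String × Int)) (a : String) :
    (l.foldl (fun d l => d.insert l.2.1
        (match d.get? l.2.1 with
         | none => (l.1, (PySem.Int.ofStr? l.2.2).getD 0)
         | some cur => if cur.2 < (PySem.Int.ofStr? l.2.2).getD 0 then (l.1, (PySem.Int.ofStr? l.2.2).getD 0) else cur)) d).get? a
    = (l.filter (fun x => x.2.1 == a)).foldl (fun o x => some (pvComb o x)) (d.get? a) := by
  induction l generalizing d with
  | nil => simp
  | cons x t ih =>
    rw [List.foldl_cons, ih]
    have hv : (d.insert x.2.1 (match d.get? x.2.1 with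
         | none => (x.1, (PySem.Int.ofStr? x.2.2).getD 0)
         | some cur => if cur.2 < (PySem.Int.ofStr? x.2.2).getD 0 then (x.1, (PySem.Int.ofStr? x.2.2).getD 0) else cur)).get? a
        = if a = x.2.1 then some (pvComb (d.get? x.2.1) x) else d.get? a := by
      rw [PySem.Dict.get?_insert]
      cases hg : d.get? x.2.1 <;> simp [pvComb, pvDt]
    by_cases hx : x.2.1 = a
    · rw [List.filter_cons_of_pos (by simp [hx]), List.foldl_cons, hv, if_pos hx.symm, hx]
    · rw [List.filter_cons_of_neg (by simp [hx]), hv, if_neg (fun e => hx e.symm)]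

theorem pv_best_head (g : List (String × String × String)) :
    g.foldl (fun o x => some (pvComb o x)) none
    = (PySem.List.sorted g (fun x => -(pvDt x))).head?.map (fun h => (h.1, pvDt h)) := by
  induction g using List.reverseRecOn with
  | nil => rfl
  | append_singleton g x ih =>
    rw [List.foldl_append, List.foldl_cons, List.foldl_nil, ih, pv_sorted_snoc]
    cases hs : PySem.List.sorted g (fun x => -(pvDt x)) with
    | nil => rfl
    | cons h t =>
      simp only [PySem.List.insertBy, Option.map_some, List.head?_cons]
      by_cases hlt : -(pvDt x) < -(pvDt h)
      · rw [if_pos (by simp [hlt])]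
        simp only [List.head?_cons, Option.map_some]
        have : pvComb (some (h.1, pvDt h)) x = (x.1, pvDt x) := by
          simp only [pvComb]
          rw [if_pos (by omega)]
        rw [this]
      · rw [if_neg (by simp [hlt])]
        simp only [List.head?_cons, Option.map_some]
        have : pvComb (some (h.1, pvDt h)) x = (h.1, pvDt h) := by
          simp only [pvComb]
          rw [if_neg (by omega)]
        rw [this]

-- the per-address group of xs, stably sorted by descending date
def pvF (xs : List (String × String × String)) (a : String) : List (String × String × String) :=
  PySem.List.sorted (xs.filter (fun x => x.2.1 == a)) (fun x => -(pvDt x))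

-- the distinct addresses of xs in ascending order
def pvA (xs : List (String × String × String)) : List String :=
  PySem.List.sorted (PySem.Set.ofList (xs.map (fun x => x.2.1))) (fun a => a)

-- the lexicographic strict-before test of A's sort
def pvLexB (a b : String × String × String) : Bool :=
  decide (a.2.1 < b.2.1) || (!decide (b.2.1 < a.2.1) && decide (-(pvDt a) < -(pvDt b)))

theorem pv_sorted2_eq (xs : List (String × String × String)) :
    PySem.List.sorted2 xs (fun x => x.2.1) (fun x => -(pvDt x))
    = xs.foldl (fun acc x => PySem.List.insertBy pvLexB x acc) [] := rfl

theorem pv_sorted2_snoc (xs : List (String × String × String)) (x : String × String × String) :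
    PySem.List.sorted2 (xs ++ [x]) (fun x => x.2.1) (fun x => -(pvDt x))
    = PySem.List.insertBy pvLexB x (PySem.List.sorted2 xs (fun x => x.2.1) (fun x => -(pvDt x))) := by
  rw [pv_sorted2_eq, pv_sorted2_eq, List.foldl_append]
  rfl

theorem pv_lexB_lt (x y : String × String × String) (h : y.2.1 < x.2.1) : pvLexB x y = false := by
  simp [pvLexB, h, lt_asymm h]

theorem pv_lexB_gt (x y : String × String × String) (h : x.2.1 < y.2.1) : pvLexB x y = true := by
  simp [pvLexB, h]

theorem pv_lexB_eq (x y : String × String × String) (h : y.2.1 = x.2.1) :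
    pvLexB x y = decide (-(pvDt x) < -(pvDt y)) := by
  simp [pvLexB, h]

theorem pv_mem_split (a : String) (A : List String) (hp : A.Pairwise (· < ·)) (ha : a ∈ A) :
    ∃ L R, A = L ++ a :: R ∧ (∀ y ∈ L, y < a) ∧ (∀ y ∈ R, a < y) := by
  induction A with
  | nil => cases ha
  | cons y A' ih =>
    rcases List.mem_cons.mp ha with rfl | ha'
    · exact ⟨[], A', rfl, by simp, (List.pairwise_cons.mp hp).1⟩
    · obtain ⟨L, R, heq, hL, hR⟩ := ih (List.pairwise_cons.mp hp).2 ha'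
      refine ⟨y :: L, R, by rw [heq]; rfl, ?_, hR⟩
      intro z hz
      rcases List.mem_cons.mp hz with rfl | hz'
      · exact (List.pairwise_cons.mp hp).1 a ha'
      · exact hL z hz'

theorem pv_insert_split (a : String) (A : List String) (hp : A.Pairwise (· < ·)) (ha : a ∉ A) :
    ∃ L R, A = L ++ R ∧
      PySem.List.insertBy (fun p q => decide (p < q)) a A = L ++ a :: R ∧
      (∀ y ∈ L, y < a) ∧ (∀ y ∈ R, a < y) := by
  induction A with
  | nil => exact ⟨[], [], rfl, rfl, by simp, by simp⟩
  | cons y A' ih =>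
    by_cases h : a < y
    · refine ⟨[], y :: A', rfl, by simp [PySem.List.insertBy, h], by simp, ?_⟩
      intro z hz
      rcases List.mem_cons.mp hz with rfl | hz'
      · exact h
      · exact lt_trans h ((List.pairwise_cons.mp hp).1 z hz')
    · have hya : y < a := by
        rcases lt_trichotomy a y with h1 | h1 | h1
        · exact absurd h1 h
        · exact absurd (h1 ▸ List.mem_cons_self) ha
        · exact h1
      obtain ⟨L, R, heq, hins, hL, hR⟩ := ih (List.pairwise_cons.mp hp).2 (fun m => ha (List.mem_cons.mpr (Or.inr m)))
      refine ⟨y :: L, R, by rw [heq]; rfl, ?_, ?_, hR⟩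
      · simp only [PySem.List.insertBy]
        rw [if_neg (by simp [h]), hins]; rfl
      · intro z hz
        rcases List.mem_cons.mp hz with rfl | hz'
        · exact hya
        · exact hL z hz'

theorem pv_flatMap_congr {α β : Type} (A : List α) (f g : α → List β)
    (h : ∀ a ∈ A, f a = g a) : A.flatMap f = A.flatMap g := by
  induction A with
  | nil => rfl
  | cons a A' ih => simp_all [List.flatMap_cons]

theorem pv_ofList_snoc (l : List String) (a : String) :
    PySem.Set.ofList (l ++ [a])
    = if a ∈ PySem.Set.ofList l then PySem.Set.ofList l else PySem.Set.ofList l ++ [a] := by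
  rw [PySem.Set.ofList_eq_foldl, List.foldl_append, ← PySem.Set.ofList_eq_foldl]
  simp only [List.foldl_cons, List.foldl_nil, PySem.Set.add, PySem.Set.contains]
  by_cases h : a ∈ PySem.Set.ofList l
  · rw [if_pos (List.contains_iff_mem.mpr h), if_pos h]
  · rw [if_neg (fun c => h (List.contains_iff_mem.mp c)), if_neg h]

theorem pv_addr_of_mem_pvF (xs : List (String × String × String)) (a : String)
    (y : String × String × String) (hy : y ∈ pvF xs a) : y.2.1 = a := by
  rw [pvF, PySem.List.mem_sorted] at hy
  exact eq_of_beq (List.mem_filter.mp hy).2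

theorem pv_pvF_ne_nil (xs : List (String × String × String)) (a : String) (ha : a ∈ pvA xs) :
    pvF xs a ≠ [] := by
  rw [pvA, PySem.List.mem_sorted, PySem.Set.mem_ofList] at ha
  obtain ⟨x, hx, hax⟩ := List.mem_map.mp ha
  rw [pvF]
  intro hnil
  rw [PySem.List.sorted_eq_nil_iff] at hnil
  exact (List.filter_eq_nil_iff.mp hnil x hx) (by simp [hax])

theorem pv_pvA_pairwise (xs : List (String × String × String)) : (pvA xs).Pairwise (· < ·) :=
  PySem.List.sorted_ofList_pairwise_lt _

theorem pv_struct (xs : List (String × String × String)) :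
    PySem.List.sorted2 xs (fun x => x.2.1) (fun x => -(pvDt x))
    = (pvA xs).flatMap (pvF xs) := by
  induction xs using List.reverseRecOn with
  | nil => rfl
  | append_singleton xs x ih =>
    rw [pv_sorted2_snoc, ih]
    have hLf : ∀ (L : List String), (∀ y ∈ L, y < x.2.1) →
        ∀ z ∈ L.flatMap (pvF xs), pvLexB x z = false := by
      intro L hL z hz
      obtain ⟨a, haL, hza⟩ := List.mem_flatMap.mp hz
      exact pv_lexB_lt x z (by rw [pv_addr_of_mem_pvF xs a z hza]; exact hL a haL)
    have hRf : ∀ (R : List String), (∀ y ∈ R, x.2.1 < y) →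
        ∀ z ∈ R.flatMap (pvF xs), pvLexB x z = true := by
      intro R hR z hz
      obtain ⟨a, haR, hza⟩ := List.mem_flatMap.mp hz
      exact pv_lexB_gt x z (by rw [pv_addr_of_mem_pvF xs a z hza]; exact hR a haR)
    have hFsame : ∀ (a : String), a ≠ x.2.1 → pvF (xs ++ [x]) a = pvF xs a := by
      intro a hne
      rw [pvF, pvF, List.filter_append]
      have : List.filter (fun y => y.2.1 == a) [x] = [] := by
        simp [hne.symm]
      rw [this, List.append_nil]
    have hFx : pvF (xs ++ [x]) x.2.1
        = PySem.List.insertBy (fun a b => decide (-(pvDt a) < -(pvDt b))) x (pvF xs x.2.1) := by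
      rw [pvF, pvF, List.filter_append]
      have : List.filter (fun y => y.2.1 == x.2.1) [x] = [x] := by simp
      rw [this]
      exact pv_sorted_snoc _ x _
    by_cases hmem : x.2.1 ∈ xs.map (fun x => x.2.1)
    · have hAeq : pvA (xs ++ [x]) = pvA xs := by
        rw [pvA, pvA, List.map_append]
        simp only [List.map_cons, List.map_nil]
        rw [pv_ofList_snoc _ x.2.1, if_pos ((PySem.Set.mem_ofList _ _).mpr hmem)]
      obtain ⟨L, R, hA, hL, hR⟩ := pv_mem_split x.2.1 (pvA xs) (pv_pvA_pairwise xs)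
        (by rw [pvA, PySem.List.mem_sorted, PySem.Set.mem_ofList]; exact hmem)
      rw [hAeq, hA, List.flatMap_append, List.flatMap_cons, List.flatMap_append, List.flatMap_cons]
      rw [← List.append_assoc, pv_insertBy_append_right pvLexB x _ _ (hRf R hR)]
      rw [pv_insertBy_append_left pvLexB x _ _ (hLf L hL)]
      rw [pv_insertBy_congr pvLexB (fun a b => decide (-(pvDt a) < -(pvDt b))) x _
        (fun y hy => pv_lexB_eq x y (pv_addr_of_mem_pvF xs x.2.1 y hy))]
      rw [← hFx]
      have hao : x.2.1 ∉ L ∧ x.2.1 ∉ R :=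
        ⟨fun m => lt_irrefl _ (hL _ m), fun m => lt_irrefl _ (hR _ m)⟩
      rw [pv_flatMap_congr L (pvF (xs ++ [x])) (pvF xs)
        (fun a ha => hFsame a (fun e => hao.1 (e ▸ ha)))]
      rw [pv_flatMap_congr R (pvF (xs ++ [x])) (pvF xs)
        (fun a ha => hFsame a (fun e => hao.2 (e ▸ ha)))]
      simp [List.append_assoc]
    · have hAeq : pvA (xs ++ [x])
          = PySem.List.insertBy (fun p q => decide (p < q)) x.2.1 (pvA xs) := by
        rw [pvA, pvA, List.map_append]
        simp only [List.map_cons, List.map_nil]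
        rw [pv_ofList_snoc _ x.2.1,
          if_neg (fun c => hmem ((PySem.Set.mem_ofList _ _).mp c))]
        exact pv_sorted_snoc _ _ _
      obtain ⟨L, R, hA, hins, hL, hR⟩ := pv_insert_split x.2.1 (pvA xs) (pv_pvA_pairwise xs)
        (by rw [pvA, PySem.List.mem_sorted, PySem.Set.mem_ofList]; exact hmem)
      have hgrp : pvF (xs ++ [x]) x.2.1 = [x] := by
        rw [pvF, List.filter_append]
        have h1 : List.filter (fun y => y.2.1 == x.2.1) xs = [] := by
          rw [List.filter_eq_nil_iff]
          intro z hz hzx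
          exact hmem (List.mem_map.mpr ⟨z, hz, eq_of_beq hzx⟩)
        have h2 : List.filter (fun y => y.2.1 == x.2.1) [x] = [x] := by simp
        rw [h1, h2, List.nil_append]
        rfl
      rw [hAeq, hins, hA, List.flatMap_append, List.flatMap_append, List.flatMap_cons]
      rw [pv_insertBy_append_left pvLexB x _ _ (hLf L hL)]
      rw [pv_insertBy_all_before pvLexB x _ (hRf R hR)]
      have hao : x.2.1 ∉ L ∧ x.2.1 ∉ R :=
        ⟨fun m => lt_irrefl _ (hL _ m), fun m => lt_irrefl _ (hR _ m)⟩
      rw [pv_flatMap_congr L (pvF (xs ++ [x])) (pvF xs)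
        (fun a ha => hFsame a (fun e => hao.1 (e ▸ ha)))]
      rw [pv_flatMap_congr R (pvF (xs ++ [x])) (pvF xs)
        (fun a ha => hFsame a (fun e => hao.2 (e ▸ ha)))]
      rw [hgrp]
      simp

theorem pv_foldA (S : List (String × String × String)) (acc : List String) (c : Option String) :
    (S.foldl (fun (st : List String × Option String) listing =>
        if some listing.2.1 ≠ st.2 then (st.1 ++ [listing.1], some listing.2.1) else st) (acc, c)).1
    = acc ++ pvGo c S := by
  induction S generalizing acc c with
  | nil => simp [pvGo]
  | cons y t ih =>
    rw [List.foldl_cons]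
    by_cases h : some y.2.1 ≠ c
    · rw [if_pos h, ih]
      simp only [pvGo, if_pos h, List.append_assoc, List.singleton_append]
    · rw [if_neg h, ih]
      simp only [pvGo, if_neg h]

theorem pv_go_skip (a : String) (block r : List (String × String × String))
    (h : ∀ y ∈ block, y.2.1 = a) :
    pvGo (some a) (block ++ r) = pvGo (some a) r := by
  induction block with
  | nil => rfl
  | cons y t ih => simp_all [pvGo]

theorem pv_go_flatMap (A : List String) (c : Option String)
    (f : String → List (String × String × String))
    (hp : A.Pairwise (· < ·))
    (hc : ∀ a ∈ A, c ≠ some a)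
    (hblk : ∀ a ∈ A, f a ≠ [] ∧ ∀ y ∈ f a, y.2.1 = a) :
    pvGo c (A.flatMap f) = A.map (fun a => ((f a).headD ("", "", "")).1) := by
  induction A generalizing c with
  | nil => rfl
  | cons a A' ih =>
    obtain ⟨hne, haddr⟩ := hblk a (by simp)
    obtain ⟨h, t, hfa⟩ : ∃ h t, f a = h :: t := by
      cases hfa : f a with
      | nil => exact absurd hfa hne
      | cons h t => exact ⟨h, t, rfl⟩
    have hh : h.2.1 = a := haddr h (by rw [hfa]; simp)
    have h1 : pvGo c (f a ++ (A'.flatMap f)) = h.1 :: pvGo (some a) (A'.flatMap f) := by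
      have hcne : some a ≠ c := fun e => hc a (by simp) e.symm
      rw [hfa]
      simp only [List.cons_append, pvGo, hh, if_pos hcne]
      exact congrArg (h.1 :: ·) (pv_go_skip a t (A'.flatMap f) (fun y hy => haddr y (by rw [hfa]; simp [hy])))
    simp only [List.flatMap_cons, h1, List.map_cons]
    congr 1
    · rw [hfa]; rfl
    · exact ih (some a)
        (by exact hp.sublist (List.sublist_cons_self a A'))
        (fun a' ha' => by
          have : a < a' := (List.pairwise_cons.mp hp).1 a' ha'
          exact fun e => absurd (Option.some.inj e) (ne_of_lt this))
        (fun a' ha' => hblk a' (by simp [ha']))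

-- B's dict-building step, named for the final assembly
def pvStepB (d : PySem.Dict String (String × Int)) (l : String × String × String) :
    PySem.Dict String (String × Int) :=
  d.insert l.2.1
    (match d.get? l.2.1 with
     | none => (l.1, (PySem.Int.ofStr? l.2.2).getD 0)
     | some cur => if cur.2 < (PySem.Int.ofStr? l.2.2).getD 0 then (l.1, (PySem.Int.ofStr? l.2.2).getD 0) else cur)

theorem pv_keys_eq (xs : List (String × String × String)) :
    (xs.foldl pvStepB PySem.Dict.empty).keys = PySem.Set.ofList (xs.map (fun x => x.2.1)) := by
  have h := PySem.Dict.keys_foldl_insert_key xs (fun l => l.2.1)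
    (fun d l => match d.get? l.2.1 with
     | none => (l.1, (PySem.Int.ofStr? l.2.2).getD 0)
     | some cur => if cur.2 < (PySem.Int.ofStr? l.2.2).getD 0 then (l.1, (PySem.Int.ofStr? l.2.2).getD 0) else cur)
    PySem.Dict.empty
  rw [show (xs.foldl pvStepB PySem.Dict.empty).keys
      = (xs.foldl (fun d l => d.insert l.2.1 (match d.get? l.2.1 with
         | none => (l.1, (PySem.Int.ofStr? l.2.2).getD 0)
         | some cur => if cur.2 < (PySem.Int.ofStr? l.2.2).getD 0 then (l.1, (PySem.Int.ofStr? l.2.2).getD 0) else cur)) PySem.Dict.empty).keys from rfl]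
  rw [h, PySem.Dict.keys_empty]
  simp only [PySem.Set.update]
  rw [← PySem.Set.ofList_eq_foldl]

theorem pv_get_eq (xs : List (String × String × String)) (a : String) :
    (xs.foldl pvStepB PySem.Dict.empty).get? a
    = (pvF xs a).head?.map (fun h => (h.1, pvDt h)) := by
  rw [show (xs.foldl pvStepB PySem.Dict.empty).get? a
      = (xs.foldl (fun d l => d.insert l.2.1 (match d.get? l.2.1 with
         | none => (l.1, (PySem.Int.ofStr? l.2.2).getD 0)
         | some cur => if cur.2 < (PySem.Int.ofStr? l.2.2).getD 0 then (l.1, (PySem.Int.ofStr? l.2.2).getD 0) else cur)) PySem.Dict.empty).get? a from rfl]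
  rw [pv_dict_get_fold, PySem.Dict.get?_empty, pv_best_head]
  rfl

-- ===== VERDICT (by name: the statement is the Claim_ definition above) =====
theorem most_recent_listings_spec : Claim_equal_most_recent_listings := by
  intro xs _ _
  show most_recent_listings xs = most_recent_listings_alt xs
  have hA1 : most_recent_listings xs
      = [] ++ pvGo none (PySem.List.sorted2 xs (fun x => x.2.1) (fun x => -(pvDt x))) :=
    pv_foldA _ [] none
  rw [pv_struct xs] at hA1
  rw [pv_go_flatMap (pvA xs) none (pvF xs) (pv_pvA_pairwise xs) (fun a _ => by simp)
    (fun a ha => ⟨pv_pvF_ne_nil xs a ha, fun y hy => pv_addr_of_mem_pvF xs a y hy⟩)] at hA1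
  rw [List.nil_append] at hA1
  have hB1 : most_recent_listings_alt xs
      = (PySem.List.sorted (xs.foldl pvStepB PySem.Dict.empty).keys (fun a => a)).map
          (fun a => ((xs.foldl pvStepB PySem.Dict.empty).getD a ("", 0)).1) := rfl
  rw [pv_keys_eq] at hB1
  rw [hA1, hB1]
  apply List.map_congr_left
  intro a ha
  obtain ⟨h, t, hfa⟩ : ∃ h t, pvF xs a = h :: t := by
    cases hfa : pvF xs a with
    | nil => exact absurd hfa (pv_pvF_ne_nil xs a ha)
    | cons h t => exact ⟨h, t, rfl⟩
  have hget : (xs.foldl pvStepB PySem.Dict.empty).get? a = some (h.1, pvDt h) := by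
    rw [pv_get_eq, hfa]; rfl
  rw [hfa, PySem.Dict.getD_of_get?_eq_some _ _ hget]
  rfl
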